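-- pv_equiv track=rewrite | github.com/SallocinAvalcante/OSINTMonki | modules/domain/pivot.py | is_noise_domain
-- ===== SOURCE A (Python) =====
-- def is_noise_domain(domain: str) -> bool:
--     """
--     Remove ambientes internos exagerados e lixo comum
--     """
--
--     NOISE = [
--         "perf", "alpha", "beta", "qa", "test",
--         "staging", "sandbox", "internal",
--         "dev", "pilot"
--     ]
--
--     for n in NOISE:
--         if domain.startswith(n + ".") or f".{n}." in domain:
--             return True
--
--     return False
-- ===== SOURCE B (Python) =====
-- def is_noise_domain(domain: str) -> bool:
--     """
--     Remove ambientes internos exagerados e lixo comum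
--     """
--     NOISE = {
--         "perf", "alpha", "beta", "qa", "test",
--         "staging", "sandbox", "internal",
--         "dev", "pilot"
--     }
--     labels = domain.split(".")
--     return any(label in NOISE for label in labels[:-1])
-- ===== Notes on version B (the rewrite author's own statement) =====
-- stated objective: simpler
-- what changed: B splits the domain into its dot-separated labels once and tests each label except the last for membership in a set of noise words, instead of scanning the whole string with startswith/substring checks once per noise word.
import Mathlib
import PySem

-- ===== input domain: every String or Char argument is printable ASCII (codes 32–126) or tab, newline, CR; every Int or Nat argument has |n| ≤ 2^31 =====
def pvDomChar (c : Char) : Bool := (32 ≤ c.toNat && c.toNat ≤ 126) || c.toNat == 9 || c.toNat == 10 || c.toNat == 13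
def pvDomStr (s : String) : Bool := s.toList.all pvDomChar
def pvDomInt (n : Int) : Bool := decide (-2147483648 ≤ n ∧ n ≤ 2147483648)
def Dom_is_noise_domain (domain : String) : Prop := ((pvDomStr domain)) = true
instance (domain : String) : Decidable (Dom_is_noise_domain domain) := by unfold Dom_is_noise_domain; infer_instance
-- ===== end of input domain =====

-- B replaces A's per-noise-word startswith/substring scans of the whole string by one split
-- of the domain into labels and a membership test of each label but the last (objective: simpler).

-- ===== PORT A =====
-- the body of A's 'for n in NOISE: if domain.startswith(n + ".") or f".{n}." in domain: return True'
def noiseCheck (domain n : String) : Bool :=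
  PySem.Str.startswith domain (n ++ ".") || PySem.Str.isIn ("." ++ n ++ ".") domain

def noiseLoop (domain : String) : List String → Bool
  | [] => false
  | n :: rest => if noiseCheck domain n then true else noiseLoop domain rest

def is_noise_domain (domain : String) : Bool :=
  noiseLoop domain
    ["perf", "alpha", "beta", "qa", "test", "staging", "sandbox", "internal", "dev", "pilot"]

-- ===== PORT B =====
def is_noise_domain_alt (domain : String) : Bool :=
  let NOISE : PySem.Set (List Char) := PySem.Set.ofList
    ["perf".toList, "alpha".toList, "beta".toList, "qa".toList, "test".toList,
     "staging".toList, "sandbox".toList, "internal".toList, "dev".toList, "pilot".toList]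
  let labels := PySem.Chars.splitOn domain.toList ['.']   -- domain.split(".")
  (PySem.List.slice labels none (some (-1))).any (fun label => List.contains NOISE label)

-- ===== PRECONDITION & SPEC =====
def Spec_is_noise_domain (domain : String) (out : Bool) : Prop := out = is_noise_domain_alt domain
instance (domain : String) (out : Bool) : Decidable (Spec_is_noise_domain domain out) := by unfold Spec_is_noise_domain; infer_instance

-- ===== CLAIM (what is proved, stated in full; the proofs are below) =====
def Claim_equal_is_noise_domain : Prop := ∀ (domain : String), Dom_is_noise_domain domain → Spec_is_noise_domain domain (is_noise_domain domain)

-- ===== LEMMAS AND PROOFS =====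

-- structural model of splitting on a single '.' (used only in the proofs)
def splitDot : List Char → List (List Char)
  | [] => [[]]
  | c :: cs =>
    if c = '.' then [] :: splitDot cs
    else match splitDot cs with
      | [] => [[c]]
      | p :: ps => (c :: p) :: ps

theorem splitDot_ne_nil (l : List Char) : splitDot l ≠ [] := by
  cases l with
  | nil => simp [splitDot]
  | cons c cs => simp only [splitDot]; split <;> [skip; split] <;> simp

def mapHd (f : List Char → List Char) : List (List Char) → List (List Char)
  | [] => []
  | p :: ps => f p :: ps

theorem splitOn_go_eq : ∀ (fuel : Nat) (l cur : List Char) (acc : List (List Char)),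
    l.length ≤ fuel →
    PySem.Chars.splitOn.go ['.'] fuel l cur acc
      = acc.reverse ++ mapHd (cur.reverse ++ ·) (splitDot l) := by
  intro fuel
  induction fuel with
  | zero =>
    intro l cur acc h
    have : l = [] := by simpa using h
    subst this
    simp [PySem.Chars.splitOn.go, splitDot, mapHd]
  | succ f ih =>
    intro l cur acc h
    cases l with
    | nil => simp [PySem.Chars.splitOn.go, splitDot, mapHd]
    | cons c rest =>
      by_cases hc : c = '.'
      · subst hc
        rw [show PySem.Chars.splitOn.go ['.'] (f+1) ('.' :: rest) cur acc
            = PySem.Chars.splitOn.go ['.'] f (List.drop 1 ('.' :: rest)) [] (cur.reverse :: acc) from by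
          simp [PySem.Chars.splitOn.go, List.isPrefixOf]]
        rw [ih _ _ _ (by simpa using Nat.le_of_succ_le_succ (by simpa using h))]
        simp only [List.drop_one, List.tail_cons, splitDot]
        cases hsd : splitDot rest with
        | nil => exact absurd hsd (splitDot_ne_nil rest)
        | cons p ps => simp [mapHd]
      · rw [show PySem.Chars.splitOn.go ['.'] (f+1) (c :: rest) cur acc
            = PySem.Chars.splitOn.go ['.'] f rest (c :: cur) acc from by
          simp [PySem.Chars.splitOn.go, List.isPrefixOf, (Ne.symm hc : '.' ≠ c)]]
        rw [ih _ _ _ (by simpa using h)]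
        simp only [splitDot, if_neg hc]
        cases hsd : splitDot rest with
        | nil => exact absurd hsd (splitDot_ne_nil rest)
        | cons p ps => simp [mapHd]

theorem splitOn_eq_splitDot (s : List Char) : PySem.Chars.splitOn s ['.'] = splitDot s := by
  rw [PySem.Chars.splitOn, splitOn_go_eq (s.length + 1) s [] [] (by omega)]
  cases hsd : splitDot s with
  | nil => exact absurd hsd (splitDot_ne_nil s)
  | cons p ps => simp [mapHd]

-- splitDot of a dotless block followed by '.' :: t
theorem splitDot_append_dot (w t : List Char) (hw : '.' ∉ w) :
    splitDot (w ++ '.' :: t) = w :: splitDot t := by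
  induction w with
  | nil => simp [splitDot]
  | cons c w ih =>
    have hc : c ≠ '.' := fun h => hw (h ▸ List.mem_cons_self ..)
    have hw' : '.' ∉ w := fun h => hw (List.mem_cons_of_mem _ h)
    simp only [List.cons_append, splitDot, if_neg hc, ih hw']

-- join: s is recovered from its pieces
theorem intercalate_splitDot (s : List Char) :
    List.intercalate ['.'] (splitDot s) = s := by
  induction s with
  | nil => simp [splitDot, List.intercalate]
  | cons c cs ih =>
    by_cases hc : c = '.'
    · subst hc
      rw [show splitDot ('.' :: cs) = [] :: splitDot cs from by simp [splitDot]]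
      cases hsd : splitDot cs with
      | nil => exact absurd hsd (splitDot_ne_nil cs)
      | cons p ps =>
        rw [hsd] at ih
        have h2 : List.intercalate ['.'] ([] :: p :: ps)
            = [] ++ ['.'] ++ List.intercalate ['.'] (p :: ps) := by simp [List.intercalate]
        rw [h2, ih]; simp
    · simp only [splitDot, if_neg hc]
      cases hsd : splitDot cs with
      | nil => exact absurd hsd (splitDot_ne_nil cs)
      | cons p ps =>
        rw [hsd] at ih
        cases ps with
        | nil => simpa [List.intercalate] using ih
        | cons q qs =>
          have h2 : List.intercalate ['.'] ((c :: p) :: q :: qs)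
              = (c :: p) ++ ['.'] ++ List.intercalate ['.'] (q :: qs) := by simp [List.intercalate]
          have h3 : List.intercalate ['.'] (p :: q :: qs)
              = p ++ ['.'] ++ List.intercalate ['.'] (q :: qs) := by simp [List.intercalate]
          rw [h3] at ih
          rw [h2, ← ih]; simp

-- A's startswith(n + ".") test ↔ first piece is w and there are ≥ 2 pieces
theorem startswith_iff_head (w s : List Char) (hw : '.' ∉ w) :
    (w ++ ['.']) <+: s ↔ ∃ ps, splitDot s = w :: ps ∧ ps ≠ [] := by
  constructor
  · rintro ⟨t, rfl⟩
    rw [List.append_assoc]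
    simp only [List.singleton_append]
    rw [splitDot_append_dot w t hw]
    exact ⟨splitDot t, rfl, splitDot_ne_nil t⟩
  · rintro ⟨ps, hsd, hps⟩
    have := intercalate_splitDot s
    rw [hsd] at this
    cases ps with
    | nil => exact absurd rfl hps
    | cons q qs =>
      have h2 : List.intercalate ['.'] (w :: q :: qs)
          = w ++ ['.'] ++ List.intercalate ['.'] (q :: qs) := by simp [List.intercalate]
      rw [h2] at this
      exact ⟨_, by simpa using this⟩

theorem mem_dropLast_cons (w p : List Char) (ps : List (List Char)) :
    w ∈ (p :: ps).dropLast ↔ (w = p ∧ ps ≠ []) ∨ w ∈ ps.dropLast := by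
  cases ps <;> simp

-- A's ".{n}." substring test ↔ n is an interior piece other than the last
theorem isIn_iff_interior (w : List Char) (hw1 : w ≠ []) (hw : '.' ∉ w) : ∀ s : List Char,
    ('.' :: (w ++ ['.'])) <:+: s ↔ w ∈ (splitDot s).tail.dropLast := by
  intro s
  induction s with
  | nil => simp [splitDot]
  | cons c cs ih =>
    rw [List.infix_cons_iff]
    by_cases hc : c = '.'
    · subst hc
      rw [show splitDot ('.' :: cs) = [] :: splitDot cs from by simp [splitDot],
        List.tail_cons]
      have hpre : ('.' :: (w ++ ['.'])) <+: ('.' :: cs) ↔ (w ++ ['.']) <+: cs := by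
        simp [List.cons_prefix_cons]
      rw [hpre, startswith_iff_head w cs hw, ih]
      cases hsd : splitDot cs with
      | nil => exact absurd hsd (splitDot_ne_nil cs)
      | cons p ps =>
        rw [List.tail_cons, mem_dropLast_cons]
        constructor
        · rintro (⟨ps', hps', hne⟩ | h)
          · obtain ⟨rfl, rfl⟩ : p = w ∧ ps = ps' := by
              constructor <;> [exact (List.cons.injEq .. ▸ hps').1; exact (List.cons.injEq .. ▸ hps').2]
            exact Or.inl ⟨rfl, hne⟩
          · exact Or.inr h
        · rintro (⟨rfl, hne⟩ | h)
          · exact Or.inl ⟨ps, rfl, hne⟩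
          · exact Or.inr h
    · have hpre : ¬ (('.' :: (w ++ ['.'])) <+: (c :: cs)) := by
        intro hp
        exact hc ((List.cons_prefix_cons.mp hp).1.symm)
      have htail : (splitDot (c :: cs)).tail = (splitDot cs).tail := by
        simp only [splitDot, if_neg hc]
        cases hsd : splitDot cs with
        | nil => exact absurd hsd (splitDot_ne_nil cs)
        | cons p ps => simp
      rw [htail, ← ih]
      simp [hpre]

-- per-word bridge: A's two tests together = membership of w among all pieces but the last
theorem check_eq_mem_dropLast (w s : List Char) (hw1 : w ≠ []) (hw : '.' ∉ w) :
    (PySem.Chars.startswith s (w ++ ['.']) || PySem.Chars.isIn ('.' :: (w ++ ['.'])) s)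
      = decide (w ∈ (splitDot s).dropLast) := by
  rw [Bool.eq_iff_iff]
  simp only [Bool.or_eq_true, decide_eq_true_eq]
  rw [show PySem.Chars.startswith s (w ++ ['.']) = true ↔ (w ++ ['.']) <+: s from by
      simp [PySem.Chars.startswith_iff],
    PySem.Chars.isIn_iff_infix, startswith_iff_head w s hw, isIn_iff_interior w hw1 hw s]
  cases hsd : splitDot s with
  | nil => exact absurd hsd (splitDot_ne_nil s)
  | cons p ps =>
    rw [List.tail_cons, mem_dropLast_cons]
    constructor
    · rintro (⟨ps', hps', hne⟩ | h)
      · obtain ⟨rfl, rfl⟩ : p = w ∧ ps = ps' := ⟨(List.cons.injEq .. ▸ hps').1, (List.cons.injEq .. ▸ hps').2⟩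
        exact Or.inl ⟨rfl, hne⟩
      · exact Or.inr h
    · rintro (⟨rfl, hne⟩ | h)
      · exact Or.inl ⟨ps, rfl, hne⟩
      · exact Or.inr h

theorem noiseLoop_eq_any (d : String) (ws : List String) :
    noiseLoop d ws = ws.any (fun n => noiseCheck d n) := by
  induction ws with
  | nil => simp [noiseLoop]
  | cons n rest ih =>
    simp only [noiseLoop, ih, List.any_cons]
    cases noiseCheck d n <;> simp

theorem slice_neg_one_dropLast (xs : List (List Char)) :
    PySem.List.slice xs none (some (-1)) = xs.dropLast := by
  simp only [PySem.List.slice, Int.reduceNeg, Order.lt_one_iff, PySem.List.clampIdx_neg_ofNat,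
    tsub_zero, List.drop_zero]
  exact List.dropLast_eq_take.symm

-- ===== VERDICT (by name: the statement is the Claim_ definition above) =====
theorem is_noise_domain_spec : Claim_equal_is_noise_domain := by
  intro d _
  unfold Spec_is_noise_domain is_noise_domain is_noise_domain_alt
  rw [noiseLoop_eq_any]
  rw [show (PySem.Set.ofList
      ["perf".toList, "alpha".toList, "beta".toList, "qa".toList, "test".toList,
       "staging".toList, "sandbox".toList, "internal".toList, "dev".toList, "pilot".toList]
      : PySem.Set (List Char))
    = ["perf".toList, "alpha".toList, "beta".toList, "qa".toList, "test".toList,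
       "staging".toList, "sandbox".toList, "internal".toList, "dev".toList, "pilot".toList]
    from by decide]
  show _ = (PySem.List.slice (PySem.Chars.splitOn d.toList ['.']) none (some (-1))).any
      (fun label => List.contains
        ["perf".toList, "alpha".toList, "beta".toList, "qa".toList, "test".toList,
         "staging".toList, "sandbox".toList, "internal".toList, "dev".toList, "pilot".toList] label)
  rw [slice_neg_one_dropLast, splitOn_eq_splitDot]
  have hA : ∀ n ∈ (["perf", "alpha", "beta", "qa", "test", "staging", "sandbox",
      "internal", "dev", "pilot"] : List String),
      noiseCheck d n = decide (n.toList ∈ (splitDot d.toList).dropLast) := by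
    intro n hn
    have h1 : n.toList ≠ [] ∧ '.' ∉ n.toList := by fin_cases hn <;> decide
    unfold noiseCheck
    have hs : (n ++ "." : String).toList = n.toList ++ ['.'] := by simp
    have hi : ("." ++ n ++ "." : String).toList = '.' :: (n.toList ++ ['.']) := by simp
    rw [show PySem.Str.startswith d (n ++ ".") = PySem.Chars.startswith d.toList (n.toList ++ ['.'])
        from by rw [PySem.Str.startswith_eq, hs],
      show PySem.Str.isIn ("." ++ n ++ ".") d = PySem.Chars.isIn ('.' :: (n.toList ++ ['.'])) d.toList
        from by rw [PySem.Str.isIn_eq, hi]]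
    exact check_eq_mem_dropLast n.toList d.toList h1.1 h1.2
  rw [Bool.eq_iff_iff]
  simp only [List.any_eq_true, decide_eq_true_eq, List.contains_eq_mem]
  constructor
  · rintro ⟨n, hn, hmem⟩
    rw [hA n hn, decide_eq_true_eq] at hmem
    exact ⟨n.toList, hmem, by fin_cases hn <;> decide⟩
  · rintro ⟨l, hl, hlc⟩
    have : ∃ n ∈ (["perf", "alpha", "beta", "qa", "test", "staging", "sandbox",
        "internal", "dev", "pilot"] : List String), n.toList = l := by
      fin_cases hlc
      · exact ⟨"perf", by simp, rfl⟩
      · exact ⟨"alpha", by simp, rfl⟩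
      · exact ⟨"beta", by simp, rfl⟩
      · exact ⟨"qa", by simp, rfl⟩
      · exact ⟨"test", by simp, rfl⟩
      · exact ⟨"staging", by simp, rfl⟩
      · exact ⟨"sandbox", by simp, rfl⟩
      · exact ⟨"internal", by simp, rfl⟩
      · exact ⟨"dev", by simp, rfl⟩
      · exact ⟨"pilot", by simp, rfl⟩
    obtain ⟨n, hn, rfl⟩ := this
    exact ⟨n, hn, by rw [hA n hn]; exact decide_eq_true hl⟩
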